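-- pv_equiv track=rewrite | github.com/UtkrishtaBhattarai/AIProject | asearch.py | get_maze_output
-- ===== SOURCE A (Python) =====
-- def get_maze_output(maze, path):
--     output = []
--     for i in range(len(maze)):
--         row = []
--         for j in range(len(maze[i])):
--             if (i, j) in path:
--                 row.append("+")
--             else:
--                 row.append(maze[i][j])
--         output.append(row)
--     return output
-- ===== SOURCE B (Python) =====
-- def get_maze_output(maze, path):
--     output = [list(row) for row in maze]
--     for (i, j) in path:
--         if 0 <= i < len(output) and 0 <= j < len(output[i]):
--             output[i][j] = "+"
--     return output
-- ===== Notes on version B (the rewrite author's own statement) =====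
-- stated objective: alternative
-- what changed: Instead of testing each of the H*W cells for membership in path, B copies the grid once and does a sparse scatter pass over path, writing '+' only at in-range coordinates.
import Mathlib
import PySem

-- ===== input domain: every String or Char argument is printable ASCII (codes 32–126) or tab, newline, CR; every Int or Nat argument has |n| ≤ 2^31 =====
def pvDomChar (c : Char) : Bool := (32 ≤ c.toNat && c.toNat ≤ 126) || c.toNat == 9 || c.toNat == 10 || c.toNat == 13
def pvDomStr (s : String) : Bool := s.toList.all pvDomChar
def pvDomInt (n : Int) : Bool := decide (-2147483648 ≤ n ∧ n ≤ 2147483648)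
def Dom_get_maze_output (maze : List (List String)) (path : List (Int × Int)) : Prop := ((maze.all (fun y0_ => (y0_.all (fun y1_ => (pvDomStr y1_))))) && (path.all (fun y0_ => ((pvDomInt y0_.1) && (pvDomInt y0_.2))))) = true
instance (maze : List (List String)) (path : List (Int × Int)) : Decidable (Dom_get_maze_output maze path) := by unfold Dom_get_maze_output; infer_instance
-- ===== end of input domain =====

-- B replaces A's per-cell membership scan by a one-time grid copy plus a sparse
-- scatter pass over the path coordinates.

-- ===== PORT A =====
-- for i in range(len(maze)): for j in range(len(maze[i])): append "+" if (i,j) in path else maze[i][j]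
def get_maze_output (maze : List (List String)) (path : List (Int × Int)) : List (List String) :=
  (List.range maze.length).foldl (fun (output : List (List String)) (i : Nat) =>
    output ++ [(List.range (maze.getD i []).length).foldl (fun (row : List String) (j : Nat) =>
      row ++ [if path.contains ((i : Int), (j : Int)) then "+" else (maze.getD i []).getD j ""]) []]) []

-- ===== PORT B =====
-- the loop body of Source B: bounds-guarded write output[i][j] = "+"
def pvStep (output : List (List String)) (p : Int × Int) : List (List String) :=
  if 0 ≤ p.1 ∧ p.1 < (output.length : Int) then
    if 0 ≤ p.2 ∧ p.2 < ((output.getD p.1.toNat []).length : Int) then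
      output.set p.1.toNat ((output.getD p.1.toNat []).set p.2.toNat "+")
    else output
  else output

-- output = [list(row) for row in maze]; then for (i, j) in path: pvStep
def get_maze_output_alt (maze : List (List String)) (path : List (Int × Int)) : List (List String) :=
  path.foldl pvStep (maze.map (fun row => row.map (fun c => c)))

-- ===== PRECONDITION & SPEC =====
def Spec_get_maze_output (maze : List (List String)) (path : List (Int × Int)) (out : List (List String)) : Prop := out = get_maze_output_alt maze path
instance (maze : List (List String)) (path : List (Int × Int)) (out : List (List String)) : Decidable (Spec_get_maze_output maze path out) := by unfold Spec_get_maze_output; infer_instance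

-- ===== CLAIM (what is proved, stated in full; the proofs are below) =====
def Claim_equal_get_maze_output : Prop := ∀ (maze : List (List String)) (path : List (Int × Int)), Dom_get_maze_output maze path → Spec_get_maze_output maze path (get_maze_output maze path)

-- ===== LEMMAS AND PROOFS =====

lemma pvStep_length (output : List (List String)) (p : Int × Int) :
    (pvStep output p).length = output.length := by
  unfold pvStep; split_ifs <;> simp

lemma pvStep_row_length (output : List (List String)) (p : Int × Int) (i : Nat) :
    ((pvStep output p).getD i []).length = (output.getD i []).length := by
  unfold pvStep
  split_ifs with h1 h2
  · by_cases hi : p.1.toNat = i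
    · subst hi
      have hlt : p.1.toNat < output.length := by omega
      simp [List.getD, hlt]
    · simp [List.getD, List.getElem?_set_ne hi]
  · rfl
  · rfl

lemma pvStep_get_ne (output : List (List String)) (p : Int × Int) (i j : Nat)
    (hp : p ≠ ((i : Int), (j : Int))) :
    ((pvStep output p).getD i []).getD j "" = (output.getD i []).getD j "" := by
  unfold pvStep
  split_ifs with h1 h2
  · by_cases hi : p.1.toNat = i
    · have hp1 : p.1 = (i : Int) := by omega
      have hp2 : p.2 ≠ (j : Int) := by
        intro h; exact hp (Prod.ext hp1 h)
      have hj' : p.2.toNat ≠ j := by omega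
      subst hi
      have hlt : p.1.toNat < output.length := by omega
      simp [List.getD, hlt, List.getElem?_set_ne hj']
    · simp [List.getD, List.getElem?_set_ne hi]
  · rfl
  · rfl

lemma pvStep_get_eq (output : List (List String)) (i j : Nat)
    (hi : i < output.length) (hj : j < (output.getD i []).length) :
    ((pvStep output ((i : Int), (j : Int))).getD i []).getD j "" = "+" := by
  unfold pvStep
  rw [if_pos (by constructor <;> omega)]
  rw [if_pos (by simp only [Int.toNat_natCast]; constructor <;> omega)]
  simp only [Int.toNat_natCast]
  have hj' : j < output[i].length := by rwa [List.getD_eq_getElem _ _ hi] at hj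
  simp [List.getD, hi, hj']

lemma pvScatter_length (path : List (Int × Int)) (output : List (List String)) :
    (path.foldl pvStep output).length = output.length := by
  induction path generalizing output with
  | nil => rfl
  | cons p rest ih => rw [List.foldl_cons, ih, pvStep_length]

lemma pvScatter_row_length (path : List (Int × Int)) (output : List (List String)) (i : Nat) :
    ((path.foldl pvStep output).getD i []).length = (output.getD i []).length := by
  induction path generalizing output with
  | nil => rfl
  | cons p rest ih => rw [List.foldl_cons, ih, pvStep_row_length]

lemma pvScatter_get (path : List (Int × Int)) (output : List (List String)) (i j : Nat)
    (hi : i < output.length) (hj : j < (output.getD i []).length) :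
    ((path.foldl pvStep output).getD i []).getD j "" =
      if path.contains ((i : Int), (j : Int)) then "+" else (output.getD i []).getD j "" := by
  induction path generalizing output with
  | nil => simp
  | cons p rest ih =>
    rw [List.foldl_cons]
    have hi' : i < (pvStep output p).length := by rw [pvStep_length]; exact hi
    have hj' : j < ((pvStep output p).getD i []).length := by rw [pvStep_row_length]; exact hj
    rw [ih (pvStep output p) hi' hj']
    by_cases hpij : p = ((i : Int), (j : Int))
    · subst hpij
      rw [pvStep_get_eq output i j hi hj]
      have : ((((i : Int), (j : Int))) :: rest).contains ((i : Int), (j : Int)) = true := by simp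
      rw [this]
      simp
    · have hcontains : ((p :: rest).contains ((i : Int), (j : Int))) = rest.contains ((i : Int), (j : Int)) := by
        simp only [List.contains_cons]
        have : (((i : Int), (j : Int)) == p) = false := by
          simpa using (fun h => hpij h.symm)
        simp [this]
      rw [hcontains, pvStep_get_ne output p i j hpij]

-- A's result as an index map
lemma portA_eq_map (maze : List (List String)) (path : List (Int × Int)) :
    get_maze_output maze path =
      (List.range maze.length).map (fun (i : Nat) =>
        (List.range (maze.getD i []).length).map (fun (j : Nat) =>
          if path.contains ((i : Int), (j : Int)) then "+" else (maze.getD i []).getD j "")) := by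
  unfold get_maze_output
  rw [PySem.List.foldl_append_singleton_eq_map]
  refine List.map_congr_left (fun i _ => ?_)
  rw [PySem.List.foldl_append_singleton_eq_map]
  simp

theorem pv_main (maze : List (List String)) (path : List (Int × Int)) :
    get_maze_output maze path = get_maze_output_alt maze path := by
  unfold get_maze_output_alt
  have hcopy : maze.map (fun row => row.map (fun c => c)) = maze := by simp
  rw [hcopy, portA_eq_map]
  apply List.ext_getElem?
  intro i
  by_cases hi : i < maze.length
  · have hB : i < (path.foldl pvStep maze).length := by rw [pvScatter_length]; exact hi
    rw [List.getElem?_eq_getElem (by simpa using hi), List.getElem?_eq_getElem hB]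
    refine congrArg some ?_
    have hrowB : (path.foldl pvStep maze)[i] = (path.foldl pvStep maze).getD i [] :=
      (List.getD_eq_getElem _ _ hB).symm
    rw [hrowB]
    simp only [List.getElem_map, List.getElem_range]
    apply List.ext_getElem?
    intro j
    by_cases hj : j < (maze.getD i []).length
    · have hjB : j < ((path.foldl pvStep maze).getD i []).length := by
        rw [pvScatter_row_length]; exact hj
      rw [List.getElem?_eq_getElem (by simpa using hj), List.getElem?_eq_getElem hjB]
      refine congrArg some ?_
      rw [show ((path.foldl pvStep maze).getD i [])[j]'hjB = ((path.foldl pvStep maze).getD i []).getD j "" from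
            (List.getD_eq_getElem _ _ hjB).symm]
      rw [pvScatter_get path maze i j hi hj]
      simp only [List.getElem_map, List.getElem_range]
    · rw [List.getElem?_eq_none (by simpa using not_lt.mp hj),
          List.getElem?_eq_none (by rw [pvScatter_row_length]; exact not_lt.mp hj)]
  · rw [List.getElem?_eq_none (by simpa using not_lt.mp hi),
        List.getElem?_eq_none (by rw [pvScatter_length]; exact not_lt.mp hi)]

-- ===== VERDICT (by name: the statement is the Claim_ definition above) =====
theorem get_maze_output_spec : Claim_equal_get_maze_output := by
  intro maze path _
  unfold Spec_get_maze_output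
  exact pv_main maze path
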